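-- pv_equiv track=rewrite | github.com/majoporse/uni | ib111/midterm1.py | flats
-- ===== SOURCE A (Python) =====
-- def flats(heights):
--     flats = []
--     for i in range(len(heights) - 1):
--         if heights[i] == heights[i + 1]:
--
--             if not flats:
--                 flats.append(heights[i])
--
--             elif heights[i] != heights[i - 1]:
--                 flats.append(heights[i])
--     return flats
-- ===== SOURCE B (Python) =====
-- def flats(heights):
--     result = []
--     run_val, run_len = 0, 0   # run_val is only read while run_len > 0
--     for h in heights:
--         if run_len > 0 and h == run_val:
--             run_len += 1
--         else:
--             if run_len >= 2:
--                 result.append(run_val)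
--             run_val, run_len = h, 1
--     if run_len >= 2:
--         result.append(run_val)
--     return result
-- ===== Notes on version B (the rewrite author's own statement) =====
-- stated objective: alternative
-- what changed: B replaces A's index-loop plateau-start detection (comparing heights[i] with both neighbours and testing accumulator emptiness) with a single run-length-encoding state machine that counts each maximal run and emits its value when a run of length >= 2 closes.
import Mathlib
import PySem

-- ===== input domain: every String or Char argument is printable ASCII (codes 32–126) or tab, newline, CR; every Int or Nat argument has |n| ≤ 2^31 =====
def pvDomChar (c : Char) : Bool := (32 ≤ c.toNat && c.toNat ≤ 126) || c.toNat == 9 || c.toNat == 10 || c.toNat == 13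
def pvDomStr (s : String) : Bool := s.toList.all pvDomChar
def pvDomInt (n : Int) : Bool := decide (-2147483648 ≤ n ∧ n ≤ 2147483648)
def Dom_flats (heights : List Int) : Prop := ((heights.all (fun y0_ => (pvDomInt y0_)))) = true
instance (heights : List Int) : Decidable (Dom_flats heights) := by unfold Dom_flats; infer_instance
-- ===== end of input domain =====

-- B replaces A's neighbour-comparing plateau-start scan by a run-length-encoding pass; same O(n) cost, different decomposition.

-- ===== PORT A =====
-- literal port of A's index loop; heights[i-1] / heights[i+1] via pyGetD (indices are
-- always valid in Python here — the default 0 is never the value used)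
def flats (heights : List Int) : List Int :=
  (PySem.List.pyRange 0 ((heights.length : Int) - 1) 1).foldl
    (fun fl i =>
      if PySem.List.pyGetD heights i 0 = PySem.List.pyGetD heights (i + 1) 0 then
        if fl = [] then fl ++ [PySem.List.pyGetD heights i 0]
        else if PySem.List.pyGetD heights i 0 ≠ PySem.List.pyGetD heights (i - 1) 0 then
          fl ++ [PySem.List.pyGetD heights i 0]
        else fl
      else fl) []

-- ===== PORT B =====
-- literal port of Source B: run-length-encoding state machine (result, run_val, run_len)
def flats_alt (heights : List Int) : List Int :=
  let st := heights.foldl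
    (fun (s : List Int × Int × Int) h =>
      if 0 < s.2.2 ∧ h = s.2.1 then (s.1, s.2.1, s.2.2 + 1)
      else ((if 2 ≤ s.2.2 then s.1 ++ [s.2.1] else s.1), h, 1))
    ([], 0, 0)
  if 2 ≤ st.2.2 then st.1 ++ [st.2.1] else st.1

-- ===== PRECONDITION & SPEC =====
def Spec_flats (heights : List Int) (out : List Int) : Prop := out = flats_alt heights
instance (heights : List Int) (out : List Int) : Decidable (Spec_flats heights out) := by unfold Spec_flats; infer_instance

-- ===== CLAIM (what is proved, stated in full; the proofs are below) =====
def Claim_equal_flats : Prop := ∀ (heights : List Int), Dom_flats heights → Spec_flats heights (flats heights)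

-- ===== LEMMAS AND PROOFS =====

-- S p x t : keys A appends while scanning, once the accumulator is nonempty:
-- previous element p, current element x, rest t
def S (p x : Int) : List Int → List Int
  | [] => []
  | y :: t => if x = y ∧ x ≠ p then x :: S x y t else S x y t

-- Sa : structural description of A's whole loop
def Sa : List Int → List Int
  | [] => []
  | [_] => []
  | x :: y :: t => if x = y then x :: S x x t else Sa (y :: t)

-- Rgo v rl t : keys B emits while inside a run of value v of current length rl
def Rgo (v rl : Int) : List Int → List Int
  | [] => if 2 ≤ rl then [v] else []
  | y :: t => if y = v then Rgo v (rl + 1) t else (if 2 ≤ rl then [v] else []) ++ Rgo y 1 t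

def R : List Int → List Int
  | [] => []
  | x :: t => Rgo x 1 t

-- the triple list (prev, cur, next) A's index loop walks over
def trip (p : Int) : List Int → List (Int × Int × Int)
  | x :: y :: t => (p, x, y) :: trip x (y :: t)
  | _ => []

-- A's loop body, on a triple
def gA (fl : List Int) (c : Int × Int × Int) : List Int :=
  if c.2.1 = c.2.2 then
    if fl = [] then fl ++ [c.2.1]
    else if c.2.1 ≠ c.1 then fl ++ [c.2.1]
    else fl
  else fl

theorem trip_length : ∀ (l : List Int) (p : Int), (trip p l).length = l.length - 1 := by
  intro l
  induction l with
  | nil => intro p; simp [trip]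
  | cons x t ih =>
    intro p
    cases t with
    | nil => simp [trip]
    | cons y t' => simp [trip, ih]

theorem trip_getElem : ∀ (l : List Int) (p : Int) (k : Nat) (hk : k < (trip p l).length),
    (trip p l)[k] = ((if k = 0 then p else l.getD (k - 1) 0), l.getD k 0, l.getD (k + 1) 0) := by
  intro l
  induction l with
  | nil => intro p k hk; simp [trip] at hk
  | cons x t ih =>
    intro p k hk
    cases t with
    | nil => simp [trip] at hk
    | cons y t' =>
      cases k with
      | zero => simp [trip, List.getD]
      | succ k' =>
        simp only [trip, List.getElem_cons_succ]
        rw [ih x k' (by simpa [trip] using hk)]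
        cases k' with
        | zero => simp [List.getD]
        | succ k'' => simp [List.getD]

theorem fold_trip_ne : ∀ (t : List Int) (p x : Int) (acc : List Int), acc ≠ [] →
    (trip p (x :: t)).foldl gA acc = acc ++ S p x t := by
  intro t
  induction t with
  | nil => intro p x acc h; simp [trip, S]
  | cons y t' ih =>
    intro p x acc h
    simp only [trip, List.foldl_cons, S]
    by_cases hxy : x = y
    · subst hxy
      by_cases hxp : x = p
      · rw [show gA acc (p, x, x) = acc by simp [gA, h, hxp]]
        rw [ih x x acc h]
        simp [hxp]
      · rw [show gA acc (p, x, x) = acc ++ [x] by simp [gA, h, hxp]]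
        rw [ih x x (acc ++ [x]) (by simp)]
        simp [hxp]
    · rw [show gA acc (p, x, y) = acc by simp [gA, hxy]]
      rw [ih x y acc h]
      simp [hxy]

theorem fold_trip_nil : ∀ (t : List Int) (x p : Int),
    (trip p (x :: t)).foldl gA [] = Sa (x :: t) := by
  intro t
  induction t with
  | nil => intro x p; simp [trip, Sa]
  | cons y t' ih =>
    intro x p
    simp only [trip, List.foldl_cons]
    by_cases hxy : x = y
    · subst hxy
      rw [show gA [] (p, x, x) = [x] by simp [gA]]
      rw [fold_trip_ne t' x x [x] (by simp)]
      simp [Sa]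
    · rw [show gA [] (p, x, y) = [] by simp [gA, hxy]]
      rw [ih y x]
      simp [Sa, hxy]

theorem S_Sa : ∀ (t : List Int) (x y : Int), x ≠ y → S x y t = Sa (y :: t) := by
  intro t
  induction t with
  | nil => intro x y h; simp [S, Sa]
  | cons z t' ih =>
    intro x y h
    by_cases hyz : y = z
    · subst hyz
      have hyx : y ≠ x := Ne.symm h
      simp [S, Sa, hyx]
    · simp only [S, Sa, if_neg (fun (hc : y = z ∧ y ≠ x) => hyz hc.1), if_neg hyz]
      exact ih y z hyz

theorem Rgo_S : ∀ (t : List Int) (v : Int),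
    (∀ p, p ≠ v → Rgo v 1 t = S p v t) ∧ (∀ rl, 2 ≤ rl → Rgo v rl t = v :: S v v t) := by
  intro t
  induction t with
  | nil =>
    intro v
    constructor
    · intro p hp; simp [Rgo, S]
    · intro rl hrl; simp [Rgo, S, hrl]
  | cons y t' ih =>
    intro v
    constructor
    · intro p hp
      by_cases hyv : y = v
      · subst hyv
        simp only [Rgo]
        rw [(ih y).2 (1 + 1) (by norm_num)]
        simp [S, Ne.symm hp]
      · simp only [Rgo, if_neg hyv]
        rw [(ih y).1 v (fun (hc : v = y) => hyv hc.symm)]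
        have hns : ¬(v = y ∧ v ≠ p) := fun hc => hyv hc.1.symm
        simp [S, hns]
    · intro rl hrl
      by_cases hyv : y = v
      · subst hyv
        simp only [Rgo]
        rw [(ih y).2 (rl + 1) (by omega)]
        simp [S]
      · simp only [Rgo, if_neg hyv, if_pos hrl]
        rw [(ih y).1 v (fun (hc : v = y) => hyv hc.symm)]
        simp [S]

theorem Sa_R : ∀ (l : List Int), Sa l = R l := by
  intro l
  match l with
  | [] => simp [Sa, R]
  | [x] => simp [Sa, R, Rgo]
  | x :: y :: t =>
    by_cases hxy : x = y
    · subst hxy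
      simp only [R, Rgo, Sa]
      rw [(Rgo_S t x).2 (1 + 1) (by norm_num)]
      simp
    · have hR : R (x :: y :: t) = Rgo y 1 t := by
        show Rgo x 1 (y :: t) = Rgo y 1 t
        rw [show Rgo x 1 (y :: t) = (if y = x then Rgo x (1 + 1) t else (if (2:Int) ≤ 1 then [x] else []) ++ Rgo y 1 t) from rfl]
        rw [if_neg (fun (hc : y = x) => hxy hc.symm)]
        norm_num
      rw [hR, (Rgo_S t y).1 x hxy, S_Sa t x y hxy]
      simp [Sa, hxy]

-- B's fold body
def gB (s : List Int × Int × Int) (h : Int) : List Int × Int × Int :=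
  if 0 < s.2.2 ∧ h = s.2.1 then (s.1, s.2.1, s.2.2 + 1)
  else ((if 2 ≤ s.2.2 then s.1 ++ [s.2.1] else s.1), h, 1)

theorem foldB_inv : ∀ (t : List Int) (res : List Int) (v rl : Int), 1 ≤ rl →
    (let st := t.foldl gB (res, v, rl); if 2 ≤ st.2.2 then st.1 ++ [st.2.1] else st.1)
      = res ++ Rgo v rl t := by
  intro t
  induction t with
  | nil => intro res v rl h; by_cases h2 : 2 ≤ rl <;> simp [Rgo, h2]
  | cons y t' ih =>
    intro res v rl h
    simp only [List.foldl_cons]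
    by_cases hyv : y = v
    · rw [show gB (res, v, rl) y = (res, v, rl + 1) by simp [gB, hyv]; omega]
      rw [ih res v (rl + 1) (by omega)]
      simp [Rgo, hyv]
    · rw [show gB (res, v, rl) y = ((if 2 ≤ rl then res ++ [v] else res), y, 1) by simp [gB, hyv]]
      rw [ih _ y 1 (by norm_num)]
      by_cases h2 : 2 ≤ rl <;> simp [Rgo, hyv, h2]

theorem flats_alt_eq_R : ∀ (l : List Int), flats_alt l = R l := by
  intro l
  match l with
  | [] => simp [flats_alt, R]
  | x :: t =>
    show (let st := (x :: t).foldl gB ([], 0, 0); if 2 ≤ st.2.2 then st.1 ++ [st.2.1] else st.1) = R (x :: t)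
    simp only [List.foldl_cons]
    rw [show gB ([], 0, 0) x = ([], x, 1) by simp [gB]]
    rw [foldB_inv t [] x 1 (by norm_num)]
    simp [R]

theorem flats_eq_Sa : ∀ (l : List Int), flats l = Sa l := by
  intro l
  match l with
  | [] => simp [flats, Sa, PySem.List.pyRange_one_eq_nil]
  | x :: t =>
    have hlen : ((trip (PySem.List.pyGetD (x :: t) (-1) 0) (x :: t)).length : Int)
        = ((x :: t).length : Int) - 1 := by
      rw [trip_length]; simp
    have hbody : ∀ (fl : List Int) (i : Int),
        i ∈ PySem.List.pyRange 0 (((x :: t).length : Int) - 1) →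
        (if PySem.List.pyGetD (x :: t) i 0 = PySem.List.pyGetD (x :: t) (i + 1) 0 then
          if fl = [] then fl ++ [PySem.List.pyGetD (x :: t) i 0]
          else if PySem.List.pyGetD (x :: t) i 0 ≠ PySem.List.pyGetD (x :: t) (i - 1) 0 then
            fl ++ [PySem.List.pyGetD (x :: t) i 0]
          else fl
        else fl)
        = gA fl (PySem.List.pyGetD (trip (PySem.List.pyGetD (x :: t) (-1) 0) (x :: t)) i (0, 0, 0)) := by
      intro fl i hi
      rw [PySem.List.mem_pyRange_one] at hi
      obtain ⟨hi0, hi1⟩ := hi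
      set l' := x :: t with hl'
      have hlenl : 2 ≤ l'.length := by
        have := hi1; omega
      have hklen : i.toNat < (trip (PySem.List.pyGetD l' (-1) 0) l').length := by
        rw [trip_length]; omega
      have htrip : PySem.List.pyGetD (trip (PySem.List.pyGetD l' (-1) 0) l') i (0, 0, 0)
          = (trip (PySem.List.pyGetD l' (-1) 0) l')[i.toNat] := by
        exact PySem.List.pyGetD_eq_getElem _ _ hi0 (by exact_mod_cast (by omega : i < ((trip (PySem.List.pyGetD l' (-1) 0) l').length : Int)))
      rw [htrip, trip_getElem _ _ _ hklen]
      have hcur : PySem.List.pyGetD l' i 0 = l'.getD i.toNat 0 :=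
        PySem.List.pyGetD_of_nonneg l' 0 hi0
      have hnext : PySem.List.pyGetD l' (i + 1) 0 = l'.getD (i.toNat + 1) 0 := by
        rw [PySem.List.pyGetD_of_nonneg l' 0 (by omega)]
        rw [show (i + 1).toNat = i.toNat + 1 by omega]
      have hprev : PySem.List.pyGetD l' (i - 1) 0
          = (if i.toNat = 0 then PySem.List.pyGetD l' (-1) 0 else l'.getD (i.toNat - 1) 0) := by
        by_cases h0 : i = 0
        · simp [h0]
        · rw [if_neg (by omega)]
          rw [PySem.List.pyGetD_of_nonneg l' 0 (by omega)]
          rw [show (i - 1).toNat = i.toNat - 1 by omega]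
      simp only [gA, hcur, hnext, hprev]
    show (PySem.List.pyRange 0 (((x :: t).length : Int) - 1)).foldl _ [] = Sa (x :: t)
    rw [PySem.List.foldl_congr_mem _ _
      (fun fl i => gA fl (PySem.List.pyGetD (trip (PySem.List.pyGetD (x :: t) (-1) 0) (x :: t)) i (0, 0, 0)))
      [] hbody]
    rw [← hlen]
    rw [PySem.List.foldl_pyRange_zero_pyGetD' _ (0, 0, 0) gA []]
    exact fold_trip_nil t x _

-- ===== VERDICT (by name: the statement is the Claim_ definition above) =====
theorem flats_spec : Claim_equal_flats := by
  intro heights _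
  unfold Spec_flats
  rw [flats_eq_Sa, flats_alt_eq_R, Sa_R]
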